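-- pv_equiv track=rewrite | github.com/randovania/randovania | randovania/interface_common/update_checker.py | _get_major_entries
-- ===== SOURCE A (Python) =====
-- MAJOR_ENTRY = "- **Major** "
--
-- def _get_major_entries(log: str) -> str:
--     result = []
--     last_added_header = None
--     current_found_header = None
--
--     def finish_entry():
--         pass
--
--     for s in log.split("\n"):
--         if s.startswith(MAJOR_ENTRY):
--             if current_found_header != last_added_header:
--                 result.append(current_found_header)
--                 last_added_header = current_found_header
--
--             result.append(s.replace(MAJOR_ENTRY, "", 1))
--
--         elif s.startswith("#"):
--             finish_entry()
--             if s.startswith("### "):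
--                 current_found_header = s
--
--     return "\n".join(result)
-- ===== SOURCE B (Python) =====
-- MAJOR_ENTRY = "- **Major** "
--
--
-- def _get_major_entries(log: str) -> str:
--     # phase 1: collect the major entries as ordered (header, text) pairs
--     pairs = []
--     header = None
--     for line in log.split("\n"):
--         if line.startswith("### "):
--             header = line
--         elif line.startswith(MAJOR_ENTRY):
--             pairs.append((header, line[len(MAJOR_ENTRY):]))
--     # phase 2: emit, printing a header only when it differs from the last one emitted
--     out = []
--     last = None
--     for header, text in pairs:
--         if header != last:
--             if header is not None:
--                 out.append(header)
--             last = header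
--         out.append(text)
--     return "\n".join(out)
-- ===== Notes on version B (the rewrite author's own statement) =====
-- stated objective: alternative
-- what changed: B replaces A's single interleaved loop (which decides header emission while scanning) with two separate passes: one that collects ordered (header, text) pairs for major entries, and one that emits them while deduplicating consecutive equal headers.
import Mathlib
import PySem

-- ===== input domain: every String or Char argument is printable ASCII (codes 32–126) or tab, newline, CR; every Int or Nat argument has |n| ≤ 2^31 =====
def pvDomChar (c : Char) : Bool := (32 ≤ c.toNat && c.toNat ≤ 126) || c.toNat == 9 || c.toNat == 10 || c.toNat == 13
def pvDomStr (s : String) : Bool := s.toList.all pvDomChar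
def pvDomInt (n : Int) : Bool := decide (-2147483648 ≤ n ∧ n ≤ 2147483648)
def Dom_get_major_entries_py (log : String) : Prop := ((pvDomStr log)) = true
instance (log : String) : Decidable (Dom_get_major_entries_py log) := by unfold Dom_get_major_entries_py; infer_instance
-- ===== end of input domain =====

-- B splits the work into two passes — collect (header, text) pairs, then emit with header dedup —
-- instead of A's single interleaved loop; objective: alternative decomposition (same cost).

def pvMAJOR : String := "- **Major** "

-- ===== PORT A =====
-- s.replace(MAJOR_ENTRY, "", 1): remove the FIRST occurrence of old (new = "", count = 1); exact
def pvReplaceOnceEmpty (s old : List Char) : List Char :=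
  let i := PySem.Chars.find s old
  if i = -1 then s else s.take i.toNat ++ s.drop (i.toNat + old.length)

-- the for-loop of A, state (result, last_added_header, current_found_header).
-- A appends current_found_header, provably non-None under its guard (cur ≠ last forces cur ≠ none
-- from the initial state), so Option.toList appends exactly that one string.
def pvLoopA : List String → List String → Option String → Option String → List String
  | [], result, _last, _cur => result
  | s :: rest, result, last, cur =>
    if PySem.Str.startswith s pvMAJOR then
      let result1 := if cur ≠ last then result ++ cur.toList else result
      let last1 := if cur ≠ last then cur else last
      pvLoopA rest (result1 ++ [String.mk (pvReplaceOnceEmpty s.toList pvMAJOR.toList)]) last1 cur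
    else if PySem.Str.startswith s "#" then
      -- finish_entry() is a no-op
      if PySem.Str.startswith s "### " then pvLoopA rest result last (some s)
      else pvLoopA rest result last cur
    else pvLoopA rest result last cur

def get_major_entries_py (log : String) : String :=
  -- log.split("\n"): sep ≠ "" so split? is always some
  PySem.Str.join "\n" (pvLoopA ((PySem.Str.split? log "\n").getD []) [] none none)

-- ===== PORT B =====
-- phase 1: collect the major entries as ordered (header, text) pairs
def pvCollectB : List String → List (Option String × String) → Option String → List (Option String × String)
  | [], pairs, _header => pairs
  | line :: rest, pairs, header =>
    if PySem.Str.startswith line "### " then pvCollectB rest pairs (some line)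
    else if PySem.Str.startswith line pvMAJOR then
      -- line[len(MAJOR_ENTRY):]
      pvCollectB rest (pairs ++ [(header, String.mk (PySem.Chars.slice line.toList (some (PySem.Str.len pvMAJOR)) none))]) header
    else pvCollectB rest pairs header

-- phase 2: emit, printing a header only when it differs from the last one emitted
def pvEmitB : List (Option String × String) → List String → Option String → List String
  | [], out, _last => out
  | (header, text) :: rest, out, last =>
    if header ≠ last then pvEmitB rest ((out ++ header.toList) ++ [text]) header
    else pvEmitB rest (out ++ [text]) last

def get_major_entries_py_alt (log : String) : String :=
  PySem.Str.join "\n" (pvEmitB (pvCollectB ((PySem.Str.split? log "\n").getD []) [] none) [] none)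

-- ===== PRECONDITION & SPEC =====
def Spec_get_major_entries_py (log : String) (out : String) : Prop := out = get_major_entries_py_alt log
instance (log : String) (out : String) : Decidable (Spec_get_major_entries_py log out) := by unfold Spec_get_major_entries_py; infer_instance

-- ===== CLAIM (what is proved, stated in full; the proofs are below) =====
def Claim_equal_get_major_entries_py : Prop := ∀ (log : String), Dom_get_major_entries_py log → Spec_get_major_entries_py log (get_major_entries_py log)

-- ===== LEMMAS AND PROOFS =====

-- pure (accumulator-free) versions of the three loops
def pvFA : List String → Option String → Option String → List String
  | [], _last, _cur => []
  | s :: rest, last, cur =>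
    if PySem.Str.startswith s pvMAJOR then
      (if cur ≠ last then cur.toList else []) ++
        String.mk (pvReplaceOnceEmpty s.toList pvMAJOR.toList) :: pvFA rest cur cur
    else if PySem.Str.startswith s "#" then
      if PySem.Str.startswith s "### " then pvFA rest last (some s)
      else pvFA rest last cur
    else pvFA rest last cur

def pvFC : List String → Option String → List (Option String × String)
  | [], _ => []
  | line :: rest, header =>
    if PySem.Str.startswith line "### " then pvFC rest (some line)
    else if PySem.Str.startswith line pvMAJOR then
      (header, String.mk (PySem.Chars.slice line.toList (some (PySem.Str.len pvMAJOR)) none)) :: pvFC rest header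
    else pvFC rest header

def pvFE : List (Option String × String) → Option String → List String
  | [], _ => []
  | (header, text) :: rest, last =>
    (if header ≠ last then header.toList else []) ++ text :: pvFE rest header

theorem pvLoopA_acc (lines : List String) : ∀ (res : List String) (last cur : Option String),
    pvLoopA lines res last cur = res ++ pvFA lines last cur := by
  induction lines with
  | nil => intro res last cur; simp [pvLoopA, pvFA]
  | cons s rest ih =>
    intro res last cur
    by_cases h1 : PySem.Chars.startswith s.toList pvMAJOR.toList = true
    · by_cases h2 : cur ≠ last
      · simp [pvLoopA, pvFA, h1, h2, ih]
      · push_neg at h2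
        subst h2
        simp [pvLoopA, pvFA, h1, ih]
    · by_cases h3 : PySem.Chars.startswith s.toList ['#'] = true <;>
        by_cases h4 : PySem.Chars.startswith s.toList ['#', '#', '#', ' '] = true <;>
        simp [pvLoopA, pvFA, h1, h3, h4, ih]

theorem pvCollectB_acc (lines : List String) :
    ∀ (pairs : List (Option String × String)) (header : Option String),
    pvCollectB lines pairs header = pairs ++ pvFC lines header := by
  induction lines with
  | nil => intro pairs header; simp [pvCollectB, pvFC]
  | cons line rest ih =>
    intro pairs header
    by_cases h1 : PySem.Chars.startswith line.toList ['#', '#', '#', ' '] = true <;>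
      by_cases h2 : PySem.Chars.startswith line.toList pvMAJOR.toList = true <;>
      simp [pvCollectB, pvFC, h1, h2, ih]

theorem pvEmitB_acc (pairs : List (Option String × String)) :
    ∀ (out : List String) (last : Option String),
    pvEmitB pairs out last = out ++ pvFE pairs last := by
  induction pairs with
  | nil => intro out last; simp [pvEmitB, pvFE]
  | cons p rest ih =>
    intro out last
    obtain ⟨header, text⟩ := p
    by_cases h : header ≠ last
    · simp [pvEmitB, pvFE, h, ih]
    · push_neg at h
      subst h
      simp [pvEmitB, pvFE, ih]

-- a line starting with "### " starts with "#" and not with MAJOR_ENTRY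
theorem pv_h3_imp_h1 (s : List Char) (h : PySem.Chars.startswith s ['#', '#', '#', ' '] = true) :
    PySem.Chars.startswith s ['#'] = true := by
  rw [PySem.Chars.startswith_iff] at *
  exact List.IsPrefix.trans (by decide) h

theorem pv_h3_not_major (s : List Char) (h : PySem.Chars.startswith s ['#', '#', '#', ' '] = true) :
    PySem.Chars.startswith s pvMAJOR.toList = false := by
  rw [PySem.Chars.startswith_iff] at h
  rw [← Bool.not_eq_true, PySem.Chars.startswith_iff]
  intro hm
  obtain ⟨t1, e1⟩ := h
  obtain ⟨t2, e2⟩ := hm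
  rw [← e1] at e2
  simp [pvMAJOR] at e2

-- A's first-occurrence replace equals B's slice on a line that startswith MAJOR_ENTRY
theorem pv_strip_eq (s : List Char) (h : PySem.Chars.startswith s pvMAJOR.toList = true) :
    pvReplaceOnceEmpty s pvMAJOR.toList
      = PySem.Chars.slice s (some (PySem.Str.len pvMAJOR)) none := by
  have hpre : pvMAJOR.toList <+: s := (PySem.Chars.startswith_iff _ _).mp h
  have hinf : pvMAJOR.toList <:+: s := hpre.isInfix
  have hne : PySem.Chars.find s pvMAJOR.toList ≠ -1 :=
    (PySem.Chars.find_ne_neg_one_iff _ _).mpr hinf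
  have hnn : 0 ≤ PySem.Chars.find s pvMAJOR.toList :=
    (PySem.Chars.find_nonneg_iff _ _).mpr hinf
  have hzero : PySem.Chars.find s pvMAJOR.toList = 0 := by
    have hspec := PySem.Chars.findFrom_natCast_spec s pvMAJOR.toList 0 (Nat.zero_le _)
      (by simpa [PySem.Chars.findFrom_zero] using hne)
    simp only [Nat.cast_zero, PySem.Chars.findFrom_zero] at hspec
    obtain ⟨-, -, hmin⟩ := hspec
    by_contra hnz
    have h0lt : 0 < (PySem.Chars.find s pvMAJOR.toList).toNat := by omega
    exact hmin 0 (by omega) h0lt (by simpa using hpre)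
  rw [pvReplaceOnceEmpty, hzero]
  have hlen : PySem.Str.len pvMAJOR = ((12 : Nat) : Int) := by decide
  rw [hlen, PySem.Chars.slice_eq_listSlice, PySem.List.slice_from_natCast]
  simp [pvMAJOR]

-- core: B's emit of the collected pairs equals A's interleaved appends
theorem pv_core (lines : List String) : ∀ (last cur : Option String),
    pvFE (pvFC lines cur) last = pvFA lines last cur := by
  induction lines with
  | nil => intro last cur; simp [pvFA, pvFC, pvFE]
  | cons s rest ih =>
    intro last cur
    by_cases h3 : PySem.Chars.startswith s.toList ['#', '#', '#', ' '] = true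
    · rw [pvFC, pvFA]
      simp [h3, pv_h3_imp_h1 s.toList h3, pv_h3_not_major s.toList h3, ih]
    · by_cases hm : PySem.Chars.startswith s.toList pvMAJOR.toList = true
      · rw [pvFC, pvFA]
        simp [pvFE, h3, hm, pv_strip_eq s.toList hm, ih]
      · rw [pvFC, pvFA]
        by_cases h1 : PySem.Chars.startswith s.toList ['#'] = true <;>
          simp [h3, hm, h1, ih]

-- ===== VERDICT (by name: the statement is the Claim_ definition above) =====
theorem get_major_entries_py_spec : Claim_equal_get_major_entries_py := by
  intro log _hdom
  unfold Spec_get_major_entries_py get_major_entries_py get_major_entries_py_alt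
  rw [pvLoopA_acc, pvCollectB_acc, pvEmitB_acc]
  simp [pv_core]
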